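-- pv_equiv track=rewrite | github.com/AChelikani/recruiting-slack-app | utils/greenhouse_utils.py | is_job_excluded
-- ===== SOURCE A (Python) =====
-- def is_job_excluded(job, exclude_jobs, include_jobs):
--     if len(exclude_jobs) == 0:
--         return False
--
--     for exclude_job_substring in exclude_jobs:
--         if exclude_job_substring in job["name"]:
--             for include_job_substring in include_jobs:
--                 if include_job_substring in job["name"]:
--                     return False
--             return True
--
--     return False
-- ===== SOURCE B (Python) =====
-- def is_job_excluded(job, exclude_jobs, include_jobs):
--     # Precedence-ordered rule table: each rule is (substring, verdict).
--     # Include rules come first (they override), exclude rules after; a single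
--     # scan returns the verdict of the first rule whose substring matches.
--     if not exclude_jobs:
--         return False
--     rules = [(s, False) for s in include_jobs] + [(s, True) for s in exclude_jobs]
--     name = job["name"]
--     for substring, verdict in rules:
--         if substring in name:
--             return verdict
--     return False
-- ===== Notes on version B (the rewrite author's own statement) =====
-- stated objective: alternative
-- what changed: A's nested early-return loops (exclude scan with an inner include scan) become a single first-match scan over one precedence-ordered rule table built by tagging include substrings with verdict False ahead of exclude substrings tagged True.
import Mathlib
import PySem

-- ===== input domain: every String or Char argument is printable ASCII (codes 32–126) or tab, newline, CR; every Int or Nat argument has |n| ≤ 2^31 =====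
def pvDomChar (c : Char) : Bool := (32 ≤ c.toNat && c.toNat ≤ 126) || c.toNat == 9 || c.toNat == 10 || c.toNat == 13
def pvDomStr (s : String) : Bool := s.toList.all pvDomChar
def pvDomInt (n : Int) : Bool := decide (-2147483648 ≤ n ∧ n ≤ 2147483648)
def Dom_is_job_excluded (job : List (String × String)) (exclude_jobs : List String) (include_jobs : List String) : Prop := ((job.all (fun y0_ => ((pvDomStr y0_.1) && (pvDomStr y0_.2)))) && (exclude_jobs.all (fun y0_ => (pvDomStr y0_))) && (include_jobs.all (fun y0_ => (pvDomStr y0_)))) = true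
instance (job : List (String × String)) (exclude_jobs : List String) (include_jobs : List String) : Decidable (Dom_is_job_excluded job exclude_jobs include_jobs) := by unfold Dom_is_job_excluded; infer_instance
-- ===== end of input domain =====

-- B replaces A's nested early-return loops by one first-match scan over a
-- precedence-ordered rule table (include rules, verdict false, before exclude
-- rules, verdict true); objective: alternative decomposition.

-- job["name"] as first-match association-list lookup (Pre_ guarantees the key
-- is present whenever it is actually read; "" is never reached under Pre_)
def pvJobName (job : List (String × String)) : String :=
  ((job.find? (fun p => p.1 == "name")).map (·.2)).getD ""

-- ===== PORT A =====
-- inner `for include_job_substring in include_jobs` loop (runs once an exclude matched)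
def pvIncLoop (job : List (String × String)) : List String → Bool
  | [] => true
  | i :: rest =>
    if PySem.Str.isIn i (pvJobName job) then false else pvIncLoop job rest

-- outer `for exclude_job_substring in exclude_jobs` loop
def pvExcLoop (job : List (String × String)) (include_jobs : List String) : List String → Bool
  | [] => false
  | e :: rest =>
    if PySem.Str.isIn e (pvJobName job) then pvIncLoop job include_jobs
    else pvExcLoop job include_jobs rest

def is_job_excluded (job : List (String × String)) (exclude_jobs : List String) (include_jobs : List String) : Bool :=
  if exclude_jobs.length == 0 then false
  else pvExcLoop job include_jobs exclude_jobs

-- ===== PORT B =====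
-- `for substring, verdict in rules: if substring in name: return verdict`
def pvRuleScan (name : String) : List (String × Bool) → Bool
  | [] => false
  | (s, v) :: rest => if PySem.Str.isIn s name then v else pvRuleScan name rest

def is_job_excluded_alt (job : List (String × String)) (exclude_jobs : List String) (include_jobs : List String) : Bool :=
  if exclude_jobs = [] then false
  else
    pvRuleScan (pvJobName job)
      (include_jobs.map (fun s => (s, false)) ++ exclude_jobs.map (fun s => (s, true)))

-- ===== PRECONDITION & SPEC =====
-- Pre_ excludes only inputs where Python A raises KeyError: exclude_jobs nonempty
-- while job has no "name" key (B raises there too).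
def Pre_is_job_excluded (job : List (String × String)) (exclude_jobs : List String) (include_jobs : List String) : Prop :=
  exclude_jobs = [] ∨ (job.find? (fun p => p.1 == "name")).isSome
instance (job : List (String × String)) (exclude_jobs : List String) (include_jobs : List String) : Decidable (Pre_is_job_excluded job exclude_jobs include_jobs) := by unfold Pre_is_job_excluded; infer_instance

def pvWitness_is_job_excluded : (List (String × String)) × List String × List String :=
  ([("name", "Software Engineer Intern")], ["Intern"], ["Senior"])

def Spec_is_job_excluded (job : List (String × String)) (exclude_jobs : List String) (include_jobs : List String) (out : Bool) : Prop := out = is_job_excluded_alt job exclude_jobs include_jobs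
instance (job : List (String × String)) (exclude_jobs : List String) (include_jobs : List String) (out : Bool) : Decidable (Spec_is_job_excluded job exclude_jobs include_jobs out) := by unfold Spec_is_job_excluded; infer_instance

-- ===== CLAIM (what is proved, stated in full; the proofs are below) =====
def Claim_equal_is_job_excluded : Prop := ∀ (job : List (String × String)) (exclude_jobs : List String) (include_jobs : List String), Dom_is_job_excluded job exclude_jobs include_jobs → Pre_is_job_excluded job exclude_jobs include_jobs → Spec_is_job_excluded job exclude_jobs include_jobs (is_job_excluded job exclude_jobs include_jobs)

-- ===== LEMMAS AND PROOFS =====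
theorem pvIncLoop_eq_not_any (job : List (String × String)) (l : List String) :
    pvIncLoop job l = !(l.any (fun i => PySem.Str.isIn i (pvJobName job))) := by
  induction l with
  | nil => rfl
  | cons i rest ih =>
    simp only [pvIncLoop, List.any_cons]
    by_cases h : PySem.Chars.isIn i.toList (pvJobName job).toList = true <;>
      simp [PySem.Str.isIn, h, ih]

theorem pvExcLoop_eq (job : List (String × String)) (inc : List String) (l : List String) :
    pvExcLoop job inc l =
      ((l.any (fun e => PySem.Str.isIn e (pvJobName job))) &&
        !(inc.any (fun i => PySem.Str.isIn i (pvJobName job)))) := by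
  induction l with
  | nil => rfl
  | cons e rest ih =>
    simp only [pvExcLoop, List.any_cons]
    by_cases h : PySem.Chars.isIn e.toList (pvJobName job).toList = true <;>
      simp [PySem.Str.isIn, h, ih, pvIncLoop_eq_not_any]

theorem pvRuleScan_false_part (n : String) (inc : List String) (t : List (String × Bool)) :
    pvRuleScan n (inc.map (fun s => (s, false)) ++ t) =
      (!(inc.any (fun i => PySem.Str.isIn i n)) && pvRuleScan n t) := by
  induction inc with
  | nil => simp
  | cons i rest ih =>
    simp only [List.map_cons, List.cons_append, pvRuleScan, List.any_cons]
    by_cases h : PySem.Chars.isIn i.toList n.toList = true <;>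
      simp [PySem.Str.isIn, h, ih]

theorem pvRuleScan_true_part (n : String) (ex : List String) :
    pvRuleScan n (ex.map (fun s => (s, true))) = ex.any (fun e => PySem.Str.isIn e n) := by
  induction ex with
  | nil => rfl
  | cons e rest ih =>
    simp only [List.map_cons, pvRuleScan, List.any_cons]
    by_cases h : PySem.Chars.isIn e.toList n.toList = true <;>
      simp [PySem.Str.isIn, h, ih]

-- ===== VERDICT (by name: the statement is the Claim_ definition above) =====
theorem is_job_excluded_spec : Claim_equal_is_job_excluded := by
  intro job ex inc _ _
  unfold Spec_is_job_excluded is_job_excluded is_job_excluded_alt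
  cases ex with
  | nil => rfl
  | cons e rest =>
    simp only [pvExcLoop_eq, pvRuleScan_false_part, pvRuleScan_true_part]
    simp [Bool.and_comm]
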